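-- pv_equiv track=rewrite | github.com/ScrapeExchange/scrape-python | scrape_exchange/scraper_supervisor.py | split_proxies
-- ===== SOURCE A (Python) =====
-- def split_proxies(
--     proxies: list[str], n: int,
-- ) -> list[list[str]]:
--     '''
--     Split *proxies* into *n* disjoint chunks of as-equal-as-
--     possible size, preserving input order. Empty chunks are
--     returned when ``n > len(proxies)`` so the caller can decide
--     whether to skip spawning children for them.
--     '''
--
--     if n <= 0:
--         raise ValueError(
--             f'num_processes must be >= 1, got {n}',
--         )
--     chunks: list[list[str]] = [[] for _ in range(n)]
--     for i, proxy in enumerate(proxies):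
--         chunks[i % n].append(proxy)
--     return chunks
-- ===== SOURCE B (Python) =====
-- def split_proxies(
--     proxies: list[str], n: int,
-- ) -> list[list[str]]:
--     '''
--     Split *proxies* into *n* disjoint chunks of as-equal-as-
--     possible size, preserving input order (round-robin), built
--     as one strided slice per chunk.
--     '''
--     if n <= 0:
--         raise ValueError(
--             f'num_processes must be >= 1, got {n}',
--         )
--     return [proxies[k::n] for k in range(n)]
-- ===== Notes on version B (the rewrite author's own statement) =====
-- stated objective: simpler
-- what changed: Instead of scattering each element into chunks[i % n] with an indexed loop over proxies, B builds each of the n chunks directly as the strided slice proxies[k::n], inverting the loop structure.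
import Mathlib
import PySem

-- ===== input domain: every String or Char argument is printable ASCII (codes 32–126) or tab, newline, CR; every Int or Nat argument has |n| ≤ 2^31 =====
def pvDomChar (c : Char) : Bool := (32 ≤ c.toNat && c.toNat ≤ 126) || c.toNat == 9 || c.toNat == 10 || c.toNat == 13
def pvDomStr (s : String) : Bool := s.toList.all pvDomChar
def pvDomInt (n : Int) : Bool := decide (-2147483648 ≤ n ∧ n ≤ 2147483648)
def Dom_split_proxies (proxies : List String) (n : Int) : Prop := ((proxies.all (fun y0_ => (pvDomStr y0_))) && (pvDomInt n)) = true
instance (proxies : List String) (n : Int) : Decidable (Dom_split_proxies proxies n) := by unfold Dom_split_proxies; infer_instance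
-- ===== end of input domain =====

-- B replaces A's scatter loop (append each proxy to chunks[i % n]) with one strided
-- slice proxies[k::n] per chunk, for a plainer one-line body (objective: simpler).


-- ===== PORT A =====
-- the 'for i, proxy in enumerate(proxies)' loop: scatter each proxy into chunks[i % n]
def pvAScatter (chunks : List (List String)) (i : Nat) (rest : List String) (n : Int) : List (List String) :=
  match rest with
  | [] => chunks
  | proxy :: ps =>
      pvAScatter
        (chunks.set (PySem.Int.mod (i : Int) n).toNat
          ((chunks.getD (PySem.Int.mod (i : Int) n).toNat []) ++ [proxy]))
        (i + 1) ps n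

def split_proxies (proxies : List String) (n : Int) : List (List String) :=
  if n ≤ 0 then []   -- Python raises ValueError here; excluded by Pre_
  else
    let chunks := (PySem.List.pyRange 0 n 1).map (fun _ => ([] : List String))
    pvAScatter chunks 0 proxies n

-- ===== PORT B =====
def split_proxies_alt (proxies : List String) (n : Int) : List (List String) :=
  if n ≤ 0 then []   -- Python raises ValueError here; excluded by Pre_
  else
    (PySem.List.pyRange 0 n 1).map
      (fun k => (PySem.List.slice? proxies (some k) none n).getD [])

-- ===== PRECONDITION & SPEC =====
-- Python A raises ValueError exactly when n <= 0
def Pre_split_proxies (_proxies : List String) (n : Int) : Prop := 1 ≤ n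
instance (proxies : List String) (n : Int) : Decidable (Pre_split_proxies proxies n) := by unfold Pre_split_proxies; infer_instance
def pvWitness_split_proxies : List String × Int := (["a", "b", "c"], 2)

def Spec_split_proxies (proxies : List String) (n : Int) (out : List (List String)) : Prop := out = split_proxies_alt proxies n
instance (proxies : List String) (n : Int) (out : List (List String)) : Decidable (Spec_split_proxies proxies n out) := by unfold Spec_split_proxies; infer_instance

-- ===== CLAIM (what is proved, stated in full; the proofs are below) =====
def Claim_equal_split_proxies : Prop := ∀ (proxies : List String) (n : Int), Dom_split_proxies proxies n → Pre_split_proxies proxies n → Spec_split_proxies proxies n (split_proxies proxies n)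

-- ===== LEMMAS AND PROOFS =====

-- List.range (c+1) unfolded at the head (no library lemma in this exact shape)
lemma pvRangeSuccLeft (n : Nat) : List.range (n + 1) = 0 :: (List.range n).map (· + 1) := by
  simp only [List.range_eq_range', List.range'_succ]
  exact congrArg _ List.range'_succ_left

-- canonical form of one chunk: every st-th element of xs, starting with its head
def pvStrided : List String → Nat → List String
  | [], _ => []
  | y :: ys, st => y :: pvStrided (ys.drop (st - 1)) st
termination_by xs _ => xs.length
decreasing_by simp

-- elements of rest whose running index (starting at i) is ≡ j (mod n')
def pvPick (rest : List String) (i j n' : Nat) : List String :=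
  match rest with
  | [] => []
  | p :: ps => if i % n' = j then p :: pvPick ps (i + 1) j n' else pvPick ps (i + 1) j n'

lemma pvStrided_drop_eq (xs : List String) (st k : Nat) (hst : 0 < st) (hk : k < xs.length) :
    pvStrided (xs.drop k) st = xs[k] :: pvStrided (xs.drop (k + st)) st := by
  rw [List.drop_eq_getElem_cons hk, pvStrided.eq_def]
  show xs[k] :: pvStrided ((xs.drop (k + 1)).drop (st - 1)) st = _
  congr 2
  rw [List.drop_drop]
  congr 1
  omega

-- the filterMap/range computation inside PySem.List.slice? equals pvStrided
lemma pvFilterMap_eq_strided (xs : List String) (st : Nat) (hst : 0 < st) :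
    ∀ (c k : Nat), c = (xs.length - k + st - 1) / st →
      List.filterMap (fun j => xs[(k + st * j)]?) (List.range c) = pvStrided (xs.drop k) st := by
  intro c
  induction c with
  | zero =>
      intro k hc
      have hlen : xs.length ≤ k := by
        rcases Nat.lt_or_ge k xs.length with h | h
        · exfalso
          have h1 : st ≤ xs.length - k + st - 1 := by omega
          have := Nat.one_le_div_iff hst |>.mpr h1
          omega
        · exact h
      rw [List.drop_eq_nil_of_le hlen]
      simp [pvStrided]
  | succ c ih =>
      intro k hc
      have hk : k < xs.length := by
        rcases Nat.lt_or_ge k xs.length with h | h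
        · exact h
        · exfalso
          have h0 : xs.length - k = 0 := by omega
          rw [h0] at hc
          have : (0 + st - 1) / st = 0 := Nat.div_eq_of_lt (by omega)
          omega
      have hnext : c = (xs.length - (k + st) + st - 1) / st := by
        rcases Nat.lt_or_ge st (xs.length - k) with h | h
        · have h2 : xs.length - k + st - 1 = (xs.length - (k + st) + st - 1) + st := by omega
          rw [h2, Nat.add_div_right _ hst] at hc
          omega
        · -- last element of the chunk
          have h0 : xs.length - (k + st) = 0 := by omega
          have h1 : (xs.length - k + st - 1) / st = 1 := by
            rw [Nat.div_eq_sub_div hst (by omega)]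
            rw [Nat.div_eq_of_lt (by omega)]
          rw [h0]
          rw [Nat.div_eq_of_lt (by omega)]
          omega
      rw [pvRangeSuccLeft, List.filterMap_cons]
      simp only [Nat.mul_zero, Nat.add_zero]
      rw [List.getElem?_eq_getElem hk]
      rw [pvStrided_drop_eq xs st k hst hk]
      simp only [List.filterMap_map]
      have harg : (fun j => xs[(k + st * (j + 1))]?) = (fun j => xs[(k + st + st * j)]?) := by
        funext j
        congr 1
        ring
      have := ih (k + st) hnext
      simp only [Function.comp_def]
      rw [show (fun j => xs[k + st * (j + 1)]?) = (fun j => xs[(k + st) + st * j]?) by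
        funext j; congr 1; ring]
      rw [this]

-- B's slice proxies[k::st] is exactly pvStrided of the k-dropped list
lemma pvSlice_eq_strided (xs : List String) (k st : Nat) (hst : 0 < st) :
    PySem.List.slice? xs (some (k : Int)) none (st : Int) = some (pvStrided (xs.drop k) st) := by
  have hst0 : (st : Int) ≠ 0 := by exact_mod_cast Nat.pos_iff_ne_zero.mp hst
  have hstneg : ¬ ((st : Int) < 0) := not_lt.mpr (Int.natCast_nonneg st)
  unfold PySem.List.slice? PySem.List.sliceIndices
  simp only [hst0, if_false, hstneg]
  rcases Nat.lt_or_ge k xs.length with hk | hk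
  case inr =>
    -- start clamps to len, empty slice
    have h1 : min (k : Int) (xs.length : Int) = (xs.length : Int) := by
      simp; exact_mod_cast hk
    have h2 : ¬ ((k : Int) < 0) := not_lt.mpr (Int.natCast_nonneg k)
    simp only [h2, if_false, h1, lt_irrefl, if_false]
    simp [List.drop_eq_nil_of_le hk, pvStrided]
  case inl =>
    have h1 : min (k : Int) (xs.length : Int) = (k : Int) := by
      simp; omega
    have h2 : ¬ ((k : Int) < 0) := not_lt.mpr (Int.natCast_nonneg k)
    have h3 : (k : Int) < (xs.length : Int) := by exact_mod_cast hk
    simp only [h2, if_false, h1, h3, if_true]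
    have hcount : (((xs.length : Int) - k + st - 1) / st).toNat = (xs.length - k + st - 1) / st := by
      have : ((xs.length : Int) - k + st - 1) = ((xs.length - k + st - 1 : Nat) : Int) := by
        omega
      rw [this, ← Int.natCast_ediv, Int.toNat_natCast]
    have hstpos : (0 : Int) < (st : Int) := by exact_mod_cast hst
    rw [if_pos hstpos, hcount]
    congr 1
    have := pvFilterMap_eq_strided xs st hst ((xs.length - k + st - 1) / st) k rfl
    rw [← this]
    apply List.filterMap_congr
    intro j _
    have harg : ((k : Int) + (st : Int) * (j : Int)).toNat = k + st * j := by
      omega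
    rw [harg]

-- skipping elements whose index is never ≡ j leaves pvPick unchanged
lemma pvPick_drop_of_ne (j n' : Nat) :
    ∀ (k : Nat) (ps : List String) (i : Nat), (∀ t, t < k → (i + t) % n' ≠ j) →
      pvPick ps i j n' = pvPick (ps.drop k) (i + k) j n' := by
  intro k
  induction k with
  | zero => intro ps i _; simp
  | succ k ih =>
      intro ps i h
      match ps with
      | [] => simp [pvPick]
      | p :: ps' =>
          have h0 : i % n' ≠ j := by
            have := h 0 (by omega)
            simpa using this
          rw [pvPick, if_neg h0]
          rw [ih ps' (i + 1) (fun t ht => by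
            have := h (t + 1) (by omega)
            rw [show i + 1 + t = i + (t + 1) by omega]
            exact this)]
          congr 1
          omega

-- when the current index already matches, pvPick is the strided selection
lemma pvPick_eq_strided (j n' : Nat) (hn : 0 < n') :
    ∀ (m : Nat) (rest : List String), rest.length ≤ m → ∀ (i : Nat), i % n' = j →
      pvPick rest i j n' = pvStrided rest n' := by
  intro m
  induction m with
  | zero =>
      intro rest hm i hi
      match rest with
      | [] => simp [pvPick, pvStrided]
  | succ m ih =>
      intro rest hm i hi
      match rest with
      | [] => simp [pvPick, pvStrided]
      | p :: ps =>
          rw [pvPick, if_pos hi, pvStrided.eq_def]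
          show _ = p :: pvStrided (ps.drop (n' - 1)) n'
          congr 1
          rw [pvPick_drop_of_ne j n' (n' - 1) ps (i + 1) (fun t ht => by
            intro hmod
            have h1 : (i + 1 + t) % n' = (i + (1 + t)) % n' := by ring_nf
            have h2 : (i + (1 + t)) % n' = (i % n' + (1 + t) % n') % n' := by
              rw [Nat.add_mod]
            have h3 : (1 + t) % n' = 1 + t := Nat.mod_eq_of_lt (by omega)
            rw [h1, h2, h3, hi] at hmod
            rcases Nat.lt_or_ge (j + (1 + t)) n' with h | h
            · rw [Nat.mod_eq_of_lt h] at hmod; omega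
            · have hj : j < n' := hi ▸ Nat.mod_lt i hn
              have : (j + (1 + t)) % n' = j + (1 + t) - n' := by
                rw [Nat.mod_eq_sub_mod h, Nat.mod_eq_of_lt (by omega)]
              rw [this] at hmod; omega)]
          apply ih (ps.drop (n' - 1)) (by simp at hm ⊢; omega)
          rw [show i + 1 + (n' - 1) = i + n' by omega]
          simpa [Nat.add_mod] using hi

-- invariant of A's scatter loop: each chunk j ends as its prefix ++ pvPick
lemma pvAScatter_spec (n' : Nat) (hn : 0 < n') :
    ∀ (rest : List String) (i : Nat) (chunks : List (List String)), chunks.length = n' →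
      pvAScatter chunks i rest (n' : Int) =
        (List.range n').map (fun j => chunks.getD j [] ++ pvPick rest i j n') := by
  intro rest
  induction rest with
  | nil =>
      intro i chunks hlen
      rw [pvAScatter]
      simp only [pvPick, List.append_nil]
      apply List.ext_getElem (by simp [hlen])
      intro j h1 h2
      simp only [List.getElem_map, List.getElem_range]
      rw [List.getD_eq_getElem _ _ (by omega)]
  | cons p ps ih =>
      intro i chunks hlen
      rw [pvAScatter]
      have hmod : (PySem.Int.mod (i : Int) (n' : Int)).toNat = i % n' := by
        rw [PySem.Int.mod_natCast, Int.toNat_natCast]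
      rw [hmod]
      rw [ih (i + 1) _ (by simpa using hlen)]
      apply List.map_congr_left
      intro j hj
      have hj' : j < n' := List.mem_range.mp hj
      by_cases hcase : i % n' = j
      · rw [pvPick, if_pos hcase, ← hcase]
        rw [List.getD_eq_getElem _ _ (by rw [List.length_set, hlen]; exact Nat.mod_lt i hn)]
        rw [List.getElem_set_self]
        rw [List.getD_eq_getElem _ _ (by rw [hlen]; exact Nat.mod_lt i hn)]
        simp
      · rw [pvPick, if_neg hcase]
        congr 1
        rcases Nat.lt_or_ge j chunks.length with hjc | hjc
        · rw [List.getD_eq_getElem _ _ (by simpa using hjc),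
              List.getD_eq_getElem _ _ hjc]
          rw [List.getElem_set_ne (by omega)]
        · omega

theorem split_proxies_spec : Claim_equal_split_proxies := by
  intro proxies n _ hpre
  unfold Spec_split_proxies split_proxies split_proxies_alt
  have hn0 : ¬ n ≤ 0 := by unfold Pre_split_proxies at hpre; omega
  rw [if_neg hn0, if_neg hn0]
  set n' := n.toNat with hn'
  have hncast : n = (n' : Int) := by omega
  have hnpos : 0 < n' := by omega
  have hrange : PySem.List.pyRange 0 n 1 = (List.range n').map Int.ofNat := by
    rw [hncast, PySem.List.pyRange_zero_natCast]; rfl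
  rw [hrange]
  simp only [List.map_map, Function.comp_def]
  rw [hncast]
  rw [pvAScatter_spec n' hnpos proxies 0 _ (by simp)]
  apply List.map_congr_left
  intro j hj
  have hj' : j < n' := List.mem_range.mp hj
  simp only [Int.ofNat_eq_natCast]
  rw [pvSlice_eq_strided proxies j n' hnpos]
  simp only [Option.getD_some]
  rw [List.getD_eq_getElem _ _ (by simpa using hj'), List.getElem_map]
  simp only [List.nil_append]
  rw [pvPick_drop_of_ne j n' j proxies 0 (fun t ht => by
        rw [Nat.zero_add, Nat.mod_eq_of_lt (by omega)]; omega)]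
  rw [Nat.zero_add]
  exact pvPick_eq_strided j n' hnpos _ _ (le_refl _) j (Nat.mod_eq_of_lt hj')
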